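-- pv_equiv track=rewrite | github.com/Solidium-X/Bioinformatics_Solutions | Proteins/noisyCyclopeptideSequencing.py | circularPeptideSubs
-- ===== SOURCE A (Python) =====
-- def rotations(peptide):
--     # Obtain all circular rotations of peptide string.
--     rotates = [peptide[i:] + peptide[:i] for i in range(len(peptide))]
--     return rotates
--
-- def circularPeptideSubs(peptide):
--     # return all of the peptide substrings within a circular peptide string.
--     rotes = rotations(peptide)
--     combos = []
--     for rote in rotes:
--         for i in range(len(rote)-1):
--             combos.append(rote[:i+1])
--     combos.append(peptide)
--
--     return combos
-- ===== SOURCE B (Python) =====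
-- def circularPeptideSubs(peptide):
--     # return all of the peptide substrings within a circular peptide string.
--     n = len(peptide)
--     doubled = peptide + peptide
--     combos = []
--     for i in range(n):
--         cur = ""
--         for c in doubled[i:i + n - 1]:
--             cur += c
--             combos.append(cur)
--     combos.append(peptide)
--     return combos
-- ===== Notes on version B (the rewrite author's own statement) =====
-- stated objective: idiomatic
-- what changed: Instead of materializing the n rotation strings and slicing prefixes off each, B concatenates peptide+peptide once and grows each rotation's prefixes incrementally character by character from the doubled string, so no rotation list and no per-prefix slicing exist.
import Mathlib
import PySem

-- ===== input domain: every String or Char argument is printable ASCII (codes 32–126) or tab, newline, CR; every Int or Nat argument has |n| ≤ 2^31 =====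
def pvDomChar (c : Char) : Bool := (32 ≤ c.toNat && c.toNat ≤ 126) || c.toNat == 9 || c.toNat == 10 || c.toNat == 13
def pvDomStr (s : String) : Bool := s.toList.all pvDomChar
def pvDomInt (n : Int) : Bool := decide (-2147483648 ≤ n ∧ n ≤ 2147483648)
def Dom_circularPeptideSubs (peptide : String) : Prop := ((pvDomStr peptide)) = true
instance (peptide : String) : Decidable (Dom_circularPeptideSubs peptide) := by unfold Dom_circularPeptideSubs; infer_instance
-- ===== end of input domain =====

-- B replaces the rotation-list helper by one doubled string and grows each rotation's
-- prefixes incrementally character by character (idiomatic restructuring; same complexity).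


-- ===== PORT A =====
-- helper 'rotations': [peptide[i:] + peptide[:i] for i in range(len(peptide))]
def rotationsA (s : List Char) : List (List Char) :=
  (PySem.List.pyRange 0 (s.length : Int) 1).map
    (fun i => PySem.List.slice s (some i) none ++ PySem.List.slice s none (some i))

def circularPeptideSubs (peptide : String) : List String :=
  let rotes := rotationsA peptide.toList
  let combos : List String :=
    rotes.foldl
      (fun acc rote =>
        (PySem.List.pyRange 0 ((rote.length : Int) - 1) 1).foldl
          (fun acc2 i => acc2 ++ [String.ofList (PySem.List.slice rote none (some (i + 1)))])
          acc)
      []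
  combos ++ [peptide]

-- ===== PORT B =====
def circularPeptideSubs_alt (peptide : String) : List String :=
  let s := peptide.toList
  let n := s.length
  let doubled := s ++ s
  let combos : List String :=
    (PySem.List.pyRange 0 (n : Int) 1).foldl
      (fun acc i =>
        -- cur = ""; for c in doubled[i:i+n-1]: cur += c; combos.append(cur)
        ((PySem.List.slice doubled (some i) (some (i + (n : Int) - 1))).foldl
          (fun (p : List Char × List String) c =>
            (p.1 ++ [c], p.2 ++ [String.ofList (p.1 ++ [c])]))
          (([] : List Char), acc)).2)
      []
  combos ++ [peptide]

-- ===== PRECONDITION & SPEC =====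
def Spec_circularPeptideSubs (peptide : String) (out : List String) : Prop := out = circularPeptideSubs_alt peptide
instance (peptide : String) (out : List String) : Decidable (Spec_circularPeptideSubs peptide out) := by unfold Spec_circularPeptideSubs; infer_instance

-- ===== CLAIM (what is proved, stated in full; the proofs are below) =====
def Claim_equal_circularPeptideSubs : Prop := ∀ (peptide : String), Dom_circularPeptideSubs peptide → Spec_circularPeptideSubs peptide (circularPeptideSubs peptide)

-- ===== LEMMAS AND PROOFS =====

-- B's inner loop: accumulating characters of seg onto cur while recording each state
-- appends exactly the prefixes of seg (extended by cur) to the output accumulator.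
theorem prefFold (seg : List Char) (cur : List Char) (acc : List String) :
    (seg.foldl
      (fun (p : List Char × List String) c =>
        (p.1 ++ [c], p.2 ++ [String.ofList (p.1 ++ [c])]))
      (cur, acc)).2
    = acc ++ (List.range seg.length).map (fun j => String.ofList (cur ++ seg.take (j + 1))) := by
  induction seg generalizing cur acc with
  | nil => simp
  | cons c cs ih =>
      simp only [List.foldl_cons, ih, List.length_cons, List.range_succ_eq_map, List.map_cons,
        List.map_map]
      simp [List.append_assoc, Function.comp_def]

theorem flatMap_congr_range {β : Type} (n : Nat) (f g : Nat → List β)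
    (h : ∀ j, j < n → f j = g j) :
    (List.range n).flatMap f = (List.range n).flatMap g := by
  induction n with
  | zero => simp
  | succ m ih =>
      simp only [List.range_succ, List.flatMap_append, List.flatMap_cons, List.flatMap_nil]
      rw [ih (fun j hj => h j (Nat.lt_succ_of_lt hj)), h m (Nat.lt_succ_self m)]

-- both loop nests, flattened to flatMaps over List.range
theorem portA_eq (peptide : String) :
    circularPeptideSubs peptide =
      (List.range peptide.toList.length).flatMap
        (fun j =>
          let r := peptide.toList.drop j ++ peptide.toList.take j
          (List.range (peptide.toList.length - 1)).map
            (fun i => String.ofList (r.take (i + 1))))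
      ++ [peptide] := by
  set s := peptide.toList with hs
  have hrot : rotationsA s =
      (List.range s.length).map (fun j => s.drop j ++ s.take j) := by
    unfold rotationsA
    rw [PySem.List.pyRange_zero_natCast, List.map_map]
    refine List.map_congr_left (fun j hj => ?_)
    simp [PySem.List.slice_from_natCast, PySem.List.slice_to_natCast]
  show (rotationsA s).foldl _ [] ++ [peptide] = _
  rw [hrot]
  have hbody : ∀ (acc : List String) (rote : List Char),
      (PySem.List.pyRange 0 ((rote.length : Int) - 1) 1).foldl
          (fun acc2 i => acc2 ++ [String.ofList (PySem.List.slice rote none (some (i + 1)))]) acc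
        = acc ++ (List.range (rote.length - 1)).map
            (fun i => String.ofList (rote.take (i + 1))) := by
    intro acc rote
    cases rote with
    | nil =>
        rw [show ((List.length ([] : List Char) : Int) - 1) = -1 by simp,
          PySem.List.pyRange_one_eq_nil (by norm_num)]
        simp
    | cons a l =>
    have hcast : (((a :: l).length : Int) - 1) = (((a :: l).length - 1 : Nat) : Int) := by
      push_cast [List.length_cons]; omega
    rw [hcast, PySem.List.pyRange_zero_natCast, List.foldl_map,
      PySem.List.foldl_append_singleton_eq_map]
    refine congrArg _ (List.map_congr_left (fun i hi => ?_))
    have : ((i : Int) + 1) = ((i + 1 : Nat) : Int) := by push_cast; ring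
    rw [this, PySem.List.slice_to_natCast]
  have hfold : ∀ (l : List (List Char)) (acc : List String),
      l.foldl (fun acc rote =>
        (PySem.List.pyRange 0 ((rote.length : Int) - 1) 1).foldl
          (fun acc2 i => acc2 ++ [String.ofList (PySem.List.slice rote none (some (i + 1)))]) acc) acc
      = acc ++ l.flatMap (fun rote => (List.range (rote.length - 1)).map
            (fun i => String.ofList (rote.take (i + 1)))) := by
    intro l
    induction l with
    | nil => simp
    | cons r t ih => intro acc; rw [List.foldl_cons, hbody, ih, List.flatMap_cons,
        List.append_assoc]
  rw [hfold, List.flatMap_map]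
  refine congrArg (· ++ [peptide]) (congrArg _ ?_)
  refine flatMap_congr_range _ _ _ (fun j hj => ?_)
  have hlen : (s.drop j ++ s.take j).length = s.length := by
    simp [List.length_append, List.length_drop, List.length_take]
    omega
  simp only [hlen]

theorem portB_eq (peptide : String) :
    circularPeptideSubs_alt peptide =
      (List.range peptide.toList.length).flatMap
        (fun j =>
          let seg := ((peptide.toList ++ peptide.toList).drop j).take (peptide.toList.length - 1)
          (List.range seg.length).map (fun i => String.ofList (seg.take (i + 1))))
      ++ [peptide] := by
  set s := peptide.toList with hs
  set n := s.length with hn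
  show (PySem.List.pyRange 0 (n : Int) 1).foldl _ [] ++ [peptide] = _
  have hseg : ∀ j : Nat, j < n →
      PySem.List.slice (s ++ s) (some (j : Int)) (some ((j : Int) + (n : Int) - 1))
        = ((s ++ s).drop j).take (n - 1) := by
    intro j hj
    have : ((j : Int) + (n : Int) - 1) = ((j + (n - 1) : Nat) : Int) := by push_cast; omega
    rw [this, PySem.List.slice_natCast]
    congr 1
    omega
  rw [PySem.List.pyRange_zero_natCast, List.foldl_map]
  have hfold : ∀ (m : Nat) (acc : List String), m ≤ n →
      (List.range m).foldl (fun acc (k : Nat) =>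
        ((PySem.List.slice (s ++ s) (some (k : Int)) (some ((k : Int) + (n : Int) - 1))).foldl
          (fun (p : List Char × List String) c =>
            (p.1 ++ [c], p.2 ++ [String.ofList (p.1 ++ [c])]))
          (([] : List Char), acc)).2) acc
      = acc ++ (List.range m).flatMap (fun j =>
          let seg := ((s ++ s).drop j).take (n - 1)
          (List.range seg.length).map (fun i => String.ofList (seg.take (i + 1)))) := by
    intro m
    induction m with
    | zero => intro acc _; simp
    | succ k ih =>
        intro acc hk
        rw [List.range_succ, List.foldl_append, List.foldl_cons, List.foldl_nil,
          ih acc (Nat.le_of_succ_le hk), hseg k (Nat.lt_of_succ_le hk), prefFold,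
          List.flatMap_append, List.flatMap_cons, List.flatMap_nil, ← List.append_assoc,
          List.append_nil]
        simp
  rw [hfold n [] (Nat.le_refl n)]
  simp
theorem take_doubled_eq (s : List Char) (j m : Nat) (hj : j ≤ s.length) (hm : m ≤ s.length) :
    ((s ++ s).drop j).take m = (s.drop j ++ s.take j).take m := by
  have hdrop : (s ++ s).drop j = s.drop j ++ s := List.drop_append_of_le_length hj
  rw [hdrop, List.take_append, List.take_append, List.take_take]
  simp only [List.length_drop]
  congr 1
  congr 1
  omega

-- ===== VERDICT (by name: the statement is the Claim_ definition above) =====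
theorem circularPeptideSubs_spec : Claim_equal_circularPeptideSubs := by
  intro peptide _
  show circularPeptideSubs peptide = circularPeptideSubs_alt peptide
  rw [portA_eq, portB_eq]
  set s := peptide.toList with hs
  refine congrArg (· ++ [peptide]) ?_
  refine flatMap_congr_range _ _ _ (fun j hj => ?_)
  simp only
  have hseglen : (((s ++ s).drop j).take (s.length - 1)).length = s.length - 1 := by
    simp [List.length_take, List.length_drop, List.length_append]
    omega
  rw [hseglen]
  refine List.map_congr_left (fun i hi => ?_)
  have hi' : i < s.length - 1 := List.mem_range.mp hi
  congr 1
  rw [List.take_take]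
  have hmin : min (i + 1) (s.length - 1) = i + 1 := by omega
  rw [hmin, take_doubled_eq s j (i + 1) (Nat.le_of_lt hj) (by omega)]
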